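-- pv_equiv track=rewrite | github.com/SanthoshReddy352/Friday_Linux | core/intent_recognizer.py | _looks_like_short_status_fragment
-- ===== SOURCE A (Python) =====
-- def _looks_like_short_status_fragment(normalized):
--     fragments = (
--         "time",
--         "current time",
--         "the time",
--         "date",
--         "today's date",
--         "current date",
--         "system info",
--         "system information",
--         "system status",
--         "system health",
--         "system details",
--         "battery",
--         "battery status",
--     )
--     return any(normalized == fragment or normalized.startswith(f"{fragment} ") for fragment in fragments)
-- ===== SOURCE B (Python) =====
-- _BY_FIRST = {
--     "time": [[]],
--     "current": [["time"], ["date"]],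
--     "the": [["time"]],
--     "date": [[]],
--     "today's": [["date"]],
--     "system": [["info"], ["information"], ["status"], ["health"], ["details"]],
--     "battery": [[], ["status"]],
-- }
--
--
-- def _looks_like_short_status_fragment(normalized):
--     # Split into space-delimited words; look up the first word in a dict
--     # keyed by first word, whose values are the possible remaining-word
--     # sequences; match any of them as a prefix of the remaining words.
--     first, *rest = normalized.split(" ")
--     tails = _BY_FIRST.get(first)
--     if tails is None:
--         return False
--     return any(rest[:len(t)] == t for t in tails)
-- ===== Notes on version B (the rewrite author's own statement) =====
-- stated objective: alternative
-- what changed: Instead of looping over the 13 fragment strings and calling startswith on each, B splits the input into space-delimited words, looks the first word up in a dict keyed by first word, and tests each stored remaining-word sequence as a prefix of the remaining words.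
import Mathlib
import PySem

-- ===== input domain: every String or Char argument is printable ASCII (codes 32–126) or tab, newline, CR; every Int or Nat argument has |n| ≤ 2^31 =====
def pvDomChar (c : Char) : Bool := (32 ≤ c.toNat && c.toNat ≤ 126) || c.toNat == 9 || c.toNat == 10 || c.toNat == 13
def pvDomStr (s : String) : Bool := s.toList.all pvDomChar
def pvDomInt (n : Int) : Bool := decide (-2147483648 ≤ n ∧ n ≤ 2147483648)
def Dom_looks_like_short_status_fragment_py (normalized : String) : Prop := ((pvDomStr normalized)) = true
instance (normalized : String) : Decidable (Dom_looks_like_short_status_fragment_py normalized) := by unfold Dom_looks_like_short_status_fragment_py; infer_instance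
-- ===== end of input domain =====

-- B splits the input into space-delimited words and matches the word list against a dict keyed
-- by first word whose values are the possible remaining-word sequences, instead of A's loop over
-- whole fragment strings with startswith; objective: alternative algorithm, same exact behaviour.

-- ===== PORT A =====
-- the tuple `fragments` of A
def pvFragments : List String :=
  ["time", "current time", "the time", "date", "today's date", "current date",
   "system info", "system information", "system status", "system health",
   "system details", "battery", "battery status"]

def looks_like_short_status_fragment_py (normalized : String) : Bool :=
  pvFragments.any (fun fragment =>
    normalized == fragment || PySem.Str.startswith normalized (fragment ++ " "))

-- ===== PORT B =====
-- the dict `_BY_FIRST` of B: first word ↦ possible remaining-word sequences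
def pvByFirst : PySem.Dict String (List (List String)) :=
  PySem.Dict.mk   -- keys are distinct, so this IS the dict literal in insertion order
    [("time", [[]]), ("current", [["time"], ["date"]]), ("the", [["time"]]),
     ("date", [[]]), ("today's", [["date"]]),
     ("system", [["info"], ["information"], ["status"], ["health"], ["details"]]),
     ("battery", [[], ["status"]])]

-- `normalized.split(" ")` (sep nonempty, so split? is always `some`; getD is never the default)
def looks_like_short_status_fragment_py_alt (normalized : String) : Bool :=
  match (PySem.Str.split? normalized " ").getD [] with
  | [] => false                       -- unreachable: split(" ") is never empty
  | first :: rest =>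
    match PySem.Dict.get? pvByFirst first with
    | none => false
    | some tails =>
      tails.any (fun t => PySem.List.slice rest none (some (t.length : Int)) == t)

-- ===== PRECONDITION & SPEC =====
def Spec_looks_like_short_status_fragment_py (normalized : String) (out : Bool) : Prop := out = looks_like_short_status_fragment_py_alt normalized
instance (normalized : String) (out : Bool) : Decidable (Spec_looks_like_short_status_fragment_py normalized out) := by unfold Spec_looks_like_short_status_fragment_py; infer_instance

-- ===== CLAIM (what is proved, stated in full; the proofs are below) =====
def Claim_equal_looks_like_short_status_fragment_py : Prop := ∀ (normalized : String), Dom_looks_like_short_status_fragment_py normalized → Spec_looks_like_short_status_fragment_py normalized (looks_like_short_status_fragment_py normalized)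

-- ===== LEMMAS AND PROOFS =====

-- A structural model of splitting a char list at single spaces.
def pvConsHd (a : List Char) : List (List Char) → List (List Char)
  | [] => [a]
  | p :: ps => (a ++ p) :: ps

def pvSplit : List Char → List (List Char)
  | [] => [[]]
  | c :: t => if c = ' ' then [] :: pvSplit t else pvConsHd [c] (pvSplit t)

def pvJoin : List (List Char) → List Char
  | [] => []
  | [p] => p
  | p :: q :: ps => p ++ ' ' :: pvJoin (q :: ps)

theorem pvSplit_ne_nil (cs : List Char) : pvSplit cs ≠ [] := by
  cases cs with
  | nil => simp [pvSplit]
  | cons c t =>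
    simp only [pvSplit]
    split
    · simp
    · cases h : pvSplit t <;> simp [pvConsHd]

theorem pvConsHd_of_ne_nil (a : List Char) (ps : List (List Char)) (h : ps ≠ []) :
    ∃ p qs, ps = p :: qs ∧ pvConsHd a ps = (a ++ p) :: qs := by
  cases ps with
  | nil => exact absurd rfl h
  | cons p qs => exact ⟨p, qs, rfl, rfl⟩

theorem pvJoin_split (cs : List Char) : pvJoin (pvSplit cs) = cs := by
  induction cs with
  | nil => simp [pvSplit, pvJoin]
  | cons c t ih =>
    simp only [pvSplit]
    obtain ⟨p, qs, hps, _⟩ := pvConsHd_of_ne_nil [c] (pvSplit t) (pvSplit_ne_nil t)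
    split
    · rename_i hc
      subst hc
      rw [hps] at ih ⊢
      cases qs <;> simp [pvJoin] at ih ⊢ <;> exact ih
    · rw [hps] at ih ⊢
      cases qs <;> simp [pvConsHd, pvJoin] at ih ⊢ <;> simp [ih]

theorem pvJoin_append (as : List (List Char)) (b : List Char) (bs : List (List Char))
    (h : as ≠ []) : pvJoin (as ++ b :: bs) = pvJoin as ++ ' ' :: pvJoin (b :: bs) := by
  induction as with
  | nil => exact absurd rfl h
  | cons a as' ih =>
    cases as' with
    | nil => simp [pvJoin]
    | cons a2 as'' =>
      have := ih (by simp)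
      simp only [List.cons_append, pvJoin] at this ⊢
      rw [this]
      simp

theorem pvSplit_append (xs ys : List Char) :
    pvSplit (xs ++ ' ' :: ys) = pvSplit xs ++ pvSplit ys := by
  induction xs with
  | nil => simp [pvSplit]
  | cons c t ih =>
    simp only [List.cons_append, pvSplit, ih]
    split
    · simp
    · obtain ⟨p, qs, hps, -⟩ := pvConsHd_of_ne_nil [c] (pvSplit t) (pvSplit_ne_nil t)
      rw [hps]
      simp [pvConsHd]

-- Key characterisation: word-list prefix ⟺ string equality or fragment-plus-space prefix.
theorem pv_split_prefix_iff (f n : List Char) :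
    pvSplit f <+: pvSplit n ↔ (n = f ∨ (f ++ [' ']) <+: n) := by
  constructor
  · rintro ⟨r, hr⟩
    cases r with
    | nil =>
      left
      have : pvJoin (pvSplit n) = pvJoin (pvSplit f) := by rw [← hr]; simp
      rwa [pvJoin_split, pvJoin_split] at this
    | cons r0 rs =>
      right
      have hn : n = pvJoin (pvSplit f ++ r0 :: rs) := by rw [hr, pvJoin_split]
      rw [pvJoin_append _ _ _ (pvSplit_ne_nil f), pvJoin_split] at hn
      exact ⟨pvJoin (r0 :: rs), by rw [hn]; simp⟩
  · rintro (rfl | ⟨t, ht⟩)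
    · exact List.prefix_rfl
    · have hn : n = f ++ ' ' :: t := by rw [← ht]; simp
      rw [hn, pvSplit_append]
      exact List.prefix_append _ _

-- PySem's splitOn at a single space computes pvSplit.
theorem pvSplitOn_go_eq (fuel : Nat) :
    ∀ (l cur : List Char) (acc : List (List Char)), l.length ≤ fuel →
      PySem.Chars.splitOn.go [' '] fuel l cur acc =
        acc.reverse ++ pvConsHd cur.reverse (pvSplit l) := by
  induction fuel with
  | zero =>
    intro l cur acc hl
    have : l = [] := List.length_eq_zero_iff.mp (Nat.le_zero.mp hl)
    subst this
    simp [PySem.Chars.splitOn.go, pvSplit, pvConsHd]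
  | succ n ih =>
    intro l cur acc hl
    cases l with
    | nil => simp [PySem.Chars.splitOn.go, pvSplit, pvConsHd]
    | cons c rest =>
      simp only [PySem.Chars.splitOn.go]
      by_cases hc : c = ' '
      · subst hc
        rw [if_pos (by simp [List.isPrefixOf])]
        simp only [List.length_cons] at hl
        rw [ih _ _ _ (by simpa using Nat.le_of_succ_le_succ hl)]
        obtain ⟨p, qs, hps, -⟩ := pvConsHd_of_ne_nil [] (pvSplit rest) (pvSplit_ne_nil rest)
        simp [pvSplit, pvConsHd, hps]
      · rw [if_neg (by simp [List.isPrefixOf, Ne.symm hc])]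
        simp only [List.length_cons] at hl
        rw [ih _ _ _ (Nat.le_of_succ_le_succ hl)]
        obtain ⟨p, qs, hps, -⟩ := pvConsHd_of_ne_nil [c] (pvSplit rest) (pvSplit_ne_nil rest)
        simp [pvSplit, hc, hps, pvConsHd]

theorem pvSplitOn_eq (cs : List Char) :
    PySem.Chars.splitOn cs [' '] = pvSplit cs := by
  unfold PySem.Chars.splitOn
  rw [pvSplitOn_go_eq (cs.length + 1) cs [] [] (Nat.le_succ _)]
  obtain ⟨p, qs, hps, -⟩ := pvConsHd_of_ne_nil [] (pvSplit cs) (pvSplit_ne_nil cs)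
  simp [hps, pvConsHd]

-- Port A characterised as an existential over fragments.
theorem pv_A_iff (n : String) :
    looks_like_short_status_fragment_py n = true ↔
      ∃ f ∈ pvFragments, (n.toList = f.toList ∨ (f.toList ++ [' ']) <+: n.toList) := by
  simp [looks_like_short_status_fragment_py, List.any_eq_true, PySem.Str.startswith,
        PySem.Chars.startswith, List.isPrefixOf_iff_prefix, String.toList_append,
        beq_iff_eq, ← String.toList_inj]

-- the fragments as word lists (strings), in A's order
def pvFragWords : List (List String) :=
  [["time"], ["current", "time"], ["the", "time"], ["date"], ["today's", "date"],
   ["current", "date"], ["system", "info"], ["system", "information"],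
   ["system", "status"], ["system", "health"], ["system", "details"],
   ["battery"], ["battery", "status"]]

theorem pv_take_prefix (t rest : List String) :
    (PySem.List.slice rest none (some (t.length : Int)) == t) = true ↔ t <+: rest := by
  rw [beq_iff_eq, PySem.List.slice_to _ (by positivity)]
  simp only [Int.toNat_natCast]
  exact ⟨fun h => h ▸ List.take_prefix _ _,
         fun h => (List.prefix_iff_eq_take.mp h).symm⟩

theorem pv_take_one_iff (a : String) (rest : List String) :
    List.take 1 rest = [a] ↔ [a] <+: rest := by
  cases rest <;> simp [List.cons_prefix_cons, eq_comm]

-- The body of B after splitting, characterised over an arbitrary word list.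
theorem pv_B_body (ws : List String) :
    (match ws with
     | [] => false
     | first :: rest =>
       match PySem.Dict.get? pvByFirst first with
       | none => false
       | some tails =>
         tails.any (fun t => PySem.List.slice rest none (some (t.length : Int)) == t)) = true
      ↔ ∃ fw ∈ pvFragWords, fw <+: ws := by
  cases ws with
  | nil =>
    simp only [pvFragWords]
    constructor
    · intro h; exact absurd h (by simp)
    · rintro ⟨fw, hfw, hpre⟩
      have : fw = [] := List.prefix_nil.mp hpre
      subst this
      simp at hfw
  | cons w rest =>
    have hmem : ∀ (t : List String),
        (PySem.List.slice rest none (some (t.length : Int)) == t) = true ↔ t <+: rest :=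
      fun t => pv_take_prefix t rest
    by_cases h1 : w = "time"
    · subst h1; simp [pvByFirst, PySem.Dict.get?_mk_cons, pvFragWords,
        List.cons_prefix_cons]
    · by_cases h2 : w = "current"
      · subst h2; simp [pvByFirst, PySem.Dict.get?_mk_cons, pvFragWords,
          pv_take_one_iff, List.cons_prefix_cons]
      · by_cases h3 : w = "the"
        · subst h3; simp [pvByFirst, PySem.Dict.get?_mk_cons, pvFragWords,
            pv_take_one_iff, List.cons_prefix_cons]
        · by_cases h4 : w = "date"
          · subst h4; simp [pvByFirst, PySem.Dict.get?_mk_cons, pvFragWords,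
              List.cons_prefix_cons]
          · by_cases h5 : w = "today's"
            · subst h5; simp [pvByFirst, PySem.Dict.get?_mk_cons, pvFragWords,
                pv_take_one_iff, List.cons_prefix_cons]
            · by_cases h6 : w = "system"
              · subst h6; simp [pvByFirst, PySem.Dict.get?_mk_cons, pvFragWords,
                  pv_take_one_iff, List.cons_prefix_cons]
              · by_cases h7 : w = "battery"
                · subst h7; simp [pvByFirst, PySem.Dict.get?_mk_cons, pvFragWords,
                    List.cons_prefix_cons]
                · simp [pvByFirst, PySem.Dict.get?, pvFragWords,
                    List.cons_prefix_cons, Ne.symm h1, Ne.symm h2, Ne.symm h3, Ne.symm h4,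
                    Ne.symm h5, Ne.symm h6, Ne.symm h7]

theorem pv_ofList_injective : Function.Injective String.ofList := by
  intro a b h
  have := congrArg String.toList h
  simpa using this

theorem pv_map_prefix_iff {α β : Type} (f : α → β) (hf : Function.Injective f)
    (xs ys : List α) : xs.map f <+: ys.map f ↔ xs <+: ys := by
  constructor
  · intro h
    have hlen : xs.length ≤ ys.length := by simpa using h.length_le
    have := List.prefix_iff_eq_take.mp h
    rw [← List.map_take] at this
    have hx : xs = ys.take xs.length := by
      apply List.map_injective_iff.mpr hf
      simpa using this
    exact hx ▸ List.take_prefix _ _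
  · exact fun h => h.map f

-- the fragments as word lists over chars, matching pvFragWords
def pvFragWordsC : List (List (List Char)) :=
  pvFragWords.map (fun fw => fw.map String.toList)

theorem pv_fragWords_eq :
    pvFragWords = pvFragWordsC.map (fun fw => fw.map String.ofList) := by decide

theorem pv_split_frags :
    pvFragments.map (fun f => pvSplit f.toList) = pvFragWordsC := by decide

-- ===== VERDICT (by name: the statement is the Claim_ definition above) =====
theorem looks_like_short_status_fragment_py_spec : Claim_equal_looks_like_short_status_fragment_py := by
  intro n _
  unfold Spec_looks_like_short_status_fragment_py
  rw [Bool.eq_iff_iff, pv_A_iff]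
  have hB : looks_like_short_status_fragment_py_alt n = true ↔
      ∃ fw ∈ pvFragWords, fw <+: (pvSplit n.toList).map String.ofList := by
    rw [← pv_B_body]
    unfold looks_like_short_status_fragment_py_alt
    have hs : (PySem.Str.split? n " ").getD [] = (pvSplit n.toList).map String.ofList := by
      rw [PySem.Str.split?]
      have : PySem.Chars.split? n.toList " ".toList =
          some (PySem.Chars.splitOn n.toList " ".toList) := by
        simp [PySem.Chars.split?]
      rw [this]
      simp [pvSplitOn_eq]
    rw [hs]
  rw [hB]
  constructor
  · rintro ⟨f, hf, hor⟩
    have hpre : pvSplit f.toList <+: pvSplit n.toList :=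
      (pv_split_prefix_iff f.toList n.toList).mpr
        (by rcases hor with h | h
            · exact Or.inl h
            · exact Or.inr h)
    have hfc : pvSplit f.toList ∈ pvFragWordsC := by
      rw [← pv_split_frags]
      exact List.mem_map_of_mem hf
    rw [pv_fragWords_eq]
    refine ⟨(pvSplit f.toList).map String.ofList, List.mem_map_of_mem hfc, ?_⟩
    have := hpre.map String.ofList
    simpa using this
  · rintro ⟨fw, hfw, hpre⟩
    rw [pv_fragWords_eq] at hfw
    obtain ⟨fwc, hfwc, rfl⟩ := List.mem_map.mp hfw
    have hpc : fwc <+: pvSplit n.toList := by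
      rw [← pv_map_prefix_iff String.ofList pv_ofList_injective]
      exact hpre
    rw [← pv_split_frags] at hfwc
    obtain ⟨f, hf, hfe⟩ := List.mem_map.mp hfwc
    refine ⟨f, hf, ?_⟩
    have := (pv_split_prefix_iff f.toList n.toList).mp (hfe ▸ hpc)
    rcases this with h | h
    · exact Or.inl (by rw [h])
    · exact Or.inr h
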